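-- pv_equiv track=rewrite | github.com/MrBrantCode/unitest_baseline | mut_generate/mist_train_cf/cf_87384/solution.py | largest_prime_palindrome
-- ===== SOURCE A (Python) =====
-- def largest_prime_palindrome(seq):
--     def is_prime(num):
--         if num <= 1:
--             return False
--         for i in range(2, int(num**0.5) + 1):
--             if num % i == 0:
--                 return False
--         return True
--
--     def is_palindrome(num):
--         return str(num) == str(num)[::-1]
--
--     largest_palindrome = -1
--     for num in seq:
--         if is_prime(num) and is_palindrome(num):
--             largest_palindrome = max(largest_palindrome, num)
--     return largest_palindrome
-- ===== SOURCE B (Python) =====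
-- def largest_prime_palindrome(seq):
--     def is_prime(num):
--         if num <= 1:
--             return False
--         for i in range(2, int(num**0.5) + 1):
--             if num % i == 0:
--                 return False
--         return True
--
--     def is_palindrome(num):
--         return str(num) == str(num)[::-1]
--
--     for num in sorted(seq, reverse=True):
--         if is_prime(num) and is_palindrome(num):
--             return num
--     return -1
-- ===== Notes on version B (the rewrite author's own statement) =====
-- stated objective: alternative
-- what changed: B replaces A's running-max accumulator over the original order with a sort-descending-then-return-first-match scan: it exits at the first prime palindrome and skips the primality tests for all remaining elements.
import Mathlib
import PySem

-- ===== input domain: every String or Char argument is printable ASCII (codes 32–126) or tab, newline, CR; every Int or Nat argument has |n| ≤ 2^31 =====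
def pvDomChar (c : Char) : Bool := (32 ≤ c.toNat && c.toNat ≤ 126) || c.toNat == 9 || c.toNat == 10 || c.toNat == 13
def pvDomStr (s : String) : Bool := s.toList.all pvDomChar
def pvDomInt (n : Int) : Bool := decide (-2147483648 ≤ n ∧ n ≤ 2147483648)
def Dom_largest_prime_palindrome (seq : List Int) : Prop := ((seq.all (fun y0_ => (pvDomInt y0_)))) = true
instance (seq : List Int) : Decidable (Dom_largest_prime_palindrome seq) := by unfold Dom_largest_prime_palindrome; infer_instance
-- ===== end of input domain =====

-- B sorts a copy of the input descending and returns the first prime palindrome (early exit),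
-- instead of A's running-max accumulator over the original order; same helper tests, same results.

-- ===== PORT A =====
-- shared helper of both Pythons (identical code in Source A and Source B): is_prime.
-- int(num**0.5) is ported as Nat.sqrt, exact for 2 ≤ num ≤ 2^31 (float sqrt rounds correctly there);
-- the branch is only reached when 1 < num.
def pvIsPrime (num : Int) : Bool :=
  if num ≤ 1 then false
  else (PySem.List.pyRange 2 ((Nat.sqrt num.toNat : Int) + 1) 1).all
    (fun i => !(PySem.Int.mod num i == 0))

-- shared helper: is_palindrome; str(num) = PySem.Int.toChars, s[::-1] is list reversal.
def pvIsPal (num : Int) : Bool :=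
  PySem.Int.toChars num == (PySem.Int.toChars num).reverse

def largest_prime_palindrome (seq : List Int) : Int :=
  seq.foldl (fun acc num => if pvIsPrime num && pvIsPal num then max acc num else acc) (-1)

-- ===== PORT B =====
def largest_prime_palindrome_alt (seq : List Int) : Int :=
  match (PySem.List.sorted seq (fun x => x) true).find? (fun num => pvIsPrime num && pvIsPal num) with
  | some num => num
  | none => -1

-- ===== PRECONDITION & SPEC =====
def Spec_largest_prime_palindrome (seq : List Int) (out : Int) : Prop := out = largest_prime_palindrome_alt seq
instance (seq : List Int) (out : Int) : Decidable (Spec_largest_prime_palindrome seq out) := by unfold Spec_largest_prime_palindrome; infer_instance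

-- ===== CLAIM (what is proved, stated in full; the proofs are below) =====
def Claim_equal_largest_prime_palindrome : Prop := ∀ (seq : List Int), Dom_largest_prime_palindrome seq → Spec_largest_prime_palindrome seq (largest_prime_palindrome seq)

-- ===== LEMMAS AND PROOFS =====

-- abbreviation used only by the proofs
def pvP (num : Int) : Bool := pvIsPrime num && pvIsPal num

theorem pvP_gt_one {n : Int} (h : pvP n = true) : 1 < n := by
  by_contra hle
  simp [pvP, pvIsPrime, Int.not_lt.mp hle] at h

def pvFoldA (l : List Int) (acc : Int) : Int :=
  l.foldl (fun acc num => if pvIsPrime num && pvIsPal num then max acc num else acc) acc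

theorem pvFoldA_acc_le (l : List Int) : ∀ acc : Int, acc ≤ pvFoldA l acc := by
  induction l with
  | nil => intro acc; simp [pvFoldA]
  | cons h t ih =>
    intro acc
    simp only [pvFoldA, List.foldl_cons]
    split_ifs
    · exact le_trans (le_max_left _ _) (ih _)
    · exact ih _

theorem pvFoldA_le (l : List Int) : ∀ acc x, x ∈ l → pvP x = true → x ≤ pvFoldA l acc := by
  induction l with
  | nil => intro _ x hx; simp at hx
  | cons h t ih =>
    intro acc x hx hp
    rcases List.mem_cons.mp hx with rfl | hx
    · simp only [pvFoldA, List.foldl_cons]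
      rw [show (pvIsPrime x && pvIsPal x) = true from hp]
      exact le_trans (le_max_right acc x) (pvFoldA_acc_le t (max acc x))
    · simp only [pvFoldA, List.foldl_cons]
      split_ifs <;> exact ih _ x hx hp

theorem pvFoldA_cases (l : List Int) : ∀ acc, pvFoldA l acc = acc ∨ (pvFoldA l acc ∈ l ∧ pvP (pvFoldA l acc) = true) := by
  induction l with
  | nil => intro acc; left; rfl
  | cons h t ih =>
    intro acc
    simp only [pvFoldA, List.foldl_cons]
    split_ifs with hc
    · have heq : pvFoldA t (max acc h) = List.foldl (fun acc num => if pvIsPrime num && pvIsPal num then max acc num else acc) (max acc h) t := rfl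
      rcases ih (max acc h) with he | ⟨hm, hp⟩
      · rcases max_choice acc h with hm | hm
        · left; rw [← heq, he, hm]
        · right
          rw [← heq, he, hm]
          exact ⟨List.mem_cons_self, hc⟩
      · right; rw [← heq]; exact ⟨List.mem_cons_of_mem _ hm, hp⟩
    · rcases ih acc with he | ⟨hm, hp⟩
      · left; exact he
      · right; exact ⟨List.mem_cons_of_mem _ hm, hp⟩

theorem pvFoldA_of_none (l : List Int) (h : ∀ x ∈ l, pvP x = false) : ∀ acc, pvFoldA l acc = acc := by
  induction l with
  | nil => intro acc; rfl
  | cons a t ih =>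
    intro acc
    simp only [pvFoldA, List.foldl_cons]
    rw [show (pvIsPrime a && pvIsPal a) = false from h a List.mem_cons_self]
    simp only [Bool.false_eq_true, if_false]
    exact ih (fun x hx => h x (List.mem_cons_of_mem _ hx)) acc

-- in a descending-sorted list, the first match is an upper bound of all matches
theorem pvFind_max (l : List Int) (m : Int)
    (hsort : l.Pairwise (fun a b => b ≤ a)) (hfind : l.find? pvP = some m) :
    ∀ x ∈ l, pvP x = true → x ≤ m := by
  induction l with
  | nil => intro x hx; simp at hx
  | cons h t ih =>
    intro x hx hp
    rcases List.pairwise_cons.mp hsort with ⟨hle, hsort'⟩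
    by_cases hph : pvP h = true
    · rw [List.find?_cons_of_pos hph] at hfind
      injection hfind with hm; subst hm
      rcases List.mem_cons.mp hx with rfl | hx
      · exact le_rfl
      · exact hle x hx
    · rw [List.find?_cons_of_neg hph] at hfind
      rcases List.mem_cons.mp hx with rfl | hx
      · exact absurd hp hph
      · exact ih hsort' hfind x hx hp

-- ===== VERDICT (by name: the statement is the Claim_ definition above) =====
theorem largest_prime_palindrome_spec : Claim_equal_largest_prime_palindrome := by
  intro seq _
  unfold Spec_largest_prime_palindrome largest_prime_palindrome largest_prime_palindrome_alt
  set s := PySem.List.sorted seq (fun x => x) true with hs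
  have hperm : ∀ x : Int, x ∈ s ↔ x ∈ seq := by
    intro x; rw [hs]; exact PySem.List.mem_sorted seq (fun x => x) true x
  have hsort : s.Pairwise (fun a b => b ≤ a) := by
    rw [hs]; simpa using PySem.List.sorted_pairwise_rev seq (fun x => x)
  rcases hfind : s.find? (fun num => pvIsPrime num && pvIsPal num) with _ | m
  · -- no match: every element fails pvP, A's fold keeps -1
    have hall : ∀ x ∈ seq, pvP x = false := by
      intro x hx
      have := List.find?_eq_none.mp hfind x ((hperm x).mpr hx)
      simpa [pvP] using this
    exact pvFoldA_of_none seq hall (-1)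
  · -- first match m in the descending order is the max of all matches
    have hfind' : s.find? pvP = some m := hfind
    have hpm : pvP m = true := List.find?_some hfind'
    have hmseq : m ∈ seq := (hperm m).mp (List.mem_of_find?_eq_some hfind')
    have hub : ∀ x ∈ seq, pvP x = true → x ≤ m := fun x hx hp =>
      pvFind_max s m hsort hfind' x ((hperm x).mpr hx) hp
    have h1 : m ≤ pvFoldA seq (-1) := pvFoldA_le seq (-1) m hmseq hpm
    show pvFoldA seq (-1) = m
    rcases pvFoldA_cases seq (-1) with heq | ⟨hmem, hp⟩
    · exfalso; have := pvP_gt_one hpm; omega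
    · exact le_antisymm (hub _ hmem hp) h1
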